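-- pv_equiv track=rewrite | github.com/Lars1x/TableOcr | ocr.py | sort_contours
-- ===== SOURCE A (Python) =====
-- def sort_contours(contours):
--     sorted_contours = []
--     item_list = []
--     contours.sort(key=lambda x: x[1])
--     prev_cont = contours[0]
--     for cont in contours:
--         if prev_cont[1]-50 < cont[1] < prev_cont[1]+50:
--             item_list.append(cont)
--         else:
--             sorted_contours.append(item_list)
--             item_list = []
--             item_list.append(cont)
--         prev_cont = cont
--     sorted_contours.append(item_list)
--     for cont in sorted_contours:
--         cont.sort()
--     return sorted_contours
-- ===== SOURCE B (Python) =====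
-- def sort_contours(contours):
--     contours.sort(key=lambda x: x[1])
--     n = len(contours)
--     cuts = [0] + [i + 1 for i in range(n - 1)
--                   if contours[i + 1][1] - contours[i][1] >= 50] + [n]
--     return [sorted(contours[a:b]) for a, b in zip(cuts, cuts[1:])]
-- ===== Notes on version B (the rewrite author's own statement) =====
-- stated objective: alternative
-- what changed: Replaces the stateful prev/item_list accumulator loop by a two-phase decomposition: compute the list of cut indices where consecutive sorted y-values jump by >= 50, then slice the sorted list at those cuts and sort each slice.
import Mathlib
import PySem

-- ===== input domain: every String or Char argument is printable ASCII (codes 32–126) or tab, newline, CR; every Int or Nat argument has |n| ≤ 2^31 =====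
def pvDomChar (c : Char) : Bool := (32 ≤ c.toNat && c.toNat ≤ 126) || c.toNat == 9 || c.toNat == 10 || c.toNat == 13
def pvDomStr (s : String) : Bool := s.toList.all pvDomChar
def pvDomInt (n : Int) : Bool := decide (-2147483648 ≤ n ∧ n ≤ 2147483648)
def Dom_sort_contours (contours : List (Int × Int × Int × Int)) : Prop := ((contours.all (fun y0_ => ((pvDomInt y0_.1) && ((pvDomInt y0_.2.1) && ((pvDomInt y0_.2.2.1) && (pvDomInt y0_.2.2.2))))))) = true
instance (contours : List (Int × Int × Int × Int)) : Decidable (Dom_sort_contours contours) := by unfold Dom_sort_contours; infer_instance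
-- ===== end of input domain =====

-- B replaces A's stateful prev/item_list accumulator loop by two phases: find the cut
-- indices (consecutive y-gap >= 50 in the y-sorted list), then slice and sort each slice.
-- Both A and B also sort the argument list in place; the equivalence proved here is about
-- the return value.

-- Python's tuple comparison is lexicographic; Mathlib's Prod order is pointwise, so the
-- default `list.sort()` / `sorted()` of 4-tuples is ported with an injective,
-- order-preserving key into the lexicographic product order (exact for Python tuples of ints).
def pvLexKey (x : Int × Int × Int × Int) : Lex (Int × Lex (Int × Lex (Int × Int))) :=
  toLex (x.1, toLex (x.2.1, toLex (x.2.2.1, x.2.2.2)))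

-- ===== PORT A =====
def sortContoursStep
    (st : List (List (Int × Int × Int × Int)) × List (Int × Int × Int × Int) × (Int × Int × Int × Int))
    (cont : Int × Int × Int × Int) :
    List (List (Int × Int × Int × Int)) × List (Int × Int × Int × Int) × (Int × Int × Int × Int) :=
  if st.2.2.2.1 - 50 < cont.2.1 ∧ cont.2.1 < st.2.2.2.1 + 50 then
    (st.1, st.2.1 ++ [cont], cont)
  else
    (st.1 ++ [st.2.1], [cont], cont)

def sort_contours (contours : List (Int × Int × Int × Int)) : List (List (Int × Int × Int × Int)) :=
  let s := PySem.List.sorted contours (fun x => x.2.1)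
  match s with
  | [] => []  -- contours[0] raises IndexError here (excluded by Pre_)
  | p :: _ =>
    let r := s.foldl sortContoursStep ([], [], p)
    (r.1 ++ [r.2.1]).map (fun g => PySem.List.sorted g pvLexKey)

-- ===== PORT B =====
def sort_contours_alt (contours : List (Int × Int × Int × Int)) : List (List (Int × Int × Int × Int)) :=
  let s := PySem.List.sorted contours (fun x => x.2.1)
  let n : Int := s.length
  -- every index produced by range(n-1) is in bounds, so s[i] is pyGetD with any default
  let cuts : List Int :=
    [0] ++ (PySem.List.pyRange 0 (n - 1) 1).filterMap
      (fun i => if 50 ≤ (PySem.List.pyGetD s (i + 1) (0,0,0,0)).2.1 - (PySem.List.pyGetD s i (0,0,0,0)).2.1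
                then some (i + 1) else none)
      ++ [n]
  (cuts.zip cuts.tail).map
    (fun ab => PySem.List.sorted (PySem.List.slice s (some ab.1) (some ab.2)) pvLexKey)

-- ===== PRECONDITION & SPEC =====
-- Pre_ excludes only the empty list, on which A raises IndexError at contours[0].
def Pre_sort_contours (contours : List (Int × Int × Int × Int)) : Prop := contours ≠ []
instance (contours : List (Int × Int × Int × Int)) : Decidable (Pre_sort_contours contours) := by
  unfold Pre_sort_contours; infer_instance

def pvWitness_sort_contours : (List (Int × Int × Int × Int)) := [(1, 2, 3, 4), (5, 100, 7, 8)]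

def Spec_sort_contours (contours : List (Int × Int × Int × Int)) (out : List (List (Int × Int × Int × Int))) : Prop := out = sort_contours_alt contours
instance (contours : List (Int × Int × Int × Int)) (out : List (List (Int × Int × Int × Int))) : Decidable (Spec_sort_contours contours out) := by unfold Spec_sort_contours; infer_instance

-- ===== CLAIM (what is proved, stated in full; the proofs are below) =====
def Claim_equal_sort_contours : Prop := ∀ (contours : List (Int × Int × Int × Int)), Dom_sort_contours contours → Pre_sort_contours contours → Spec_sort_contours contours (sort_contours contours)

-- ===== LEMMAS AND PROOFS =====

-- The common grouping of a y-sorted tail `l` after previous element `prev`, with the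
-- current group `il` accumulated so far (A's loop-body condition, verbatim).
def pvAttach (il : List (Int × Int × Int × Int)) (prev : Int × Int × Int × Int) :
    List (Int × Int × Int × Int) → List (List (Int × Int × Int × Int))
  | [] => [il]
  | c :: t =>
    if prev.2.1 - 50 < c.2.1 ∧ c.2.1 < prev.2.1 + 50 then pvAttach (il ++ [c]) c t
    else il :: pvAttach [c] c t

lemma pvAttach_il (il il' prev) (l : List (Int × Int × Int × Int)) :
    pvAttach (il ++ il') prev l =
      ((il ++ (pvAttach il' prev l).headI) :: (pvAttach il' prev l).tail) := by
  induction l generalizing il il' prev with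
  | nil => simp [pvAttach]
  | cons c t ih =>
    simp only [pvAttach]
    split_ifs with h
    · rw [List.append_assoc, ih]
    · simp

-- ----- A-side: the fold computes pvAttach -----
lemma foldA_eq (l : List (Int × Int × Int × Int)) :
    ∀ sc il prev,
      (l.foldl sortContoursStep (sc, il, prev)).1 ++ [(l.foldl sortContoursStep (sc, il, prev)).2.1]
        = sc ++ pvAttach il prev l := by
  induction l with
  | nil => intro sc il prev; simp [pvAttach]
  | cons c t ih =>
    intro sc il prev
    simp only [List.foldl_cons, sortContoursStep, pvAttach]
    split_ifs with h
    · exact ih sc (il ++ [c]) c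
    · rw [ih (sc ++ [il]) [c] c, List.append_assoc]; simp

-- ----- B-side helpers (pure Nat reformulation of the port's cut/slice computation) -----
def pvGapAt (s : List (Int × Int × Int × Int)) (i : Nat) : Bool :=
  decide (50 ≤ (s.getD (i + 1) (0,0,0,0)).2.1 - (s.getD i (0,0,0,0)).2.1)

def pvGaps (s : List (Int × Int × Int × Int)) : List Nat :=
  (List.range (s.length - 1)).filterMap (fun i => if pvGapAt s i then some (i + 1) else none)

def pvCuts (s : List (Int × Int × Int × Int)) : List Nat := 0 :: (pvGaps s ++ [s.length])

def pvGroups (s : List (Int × Int × Int × Int)) : List (List (Int × Int × Int × Int)) :=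
  ((pvCuts s).zip (pvCuts s).tail).map (fun ab => (s.drop ab.1).take (ab.2 - ab.1))

lemma gaps_int_eq (s : List (Int × Int × Int × Int)) :
    (PySem.List.pyRange 0 ((s.length : Int) - 1) 1).filterMap
      (fun i => if 50 ≤ (PySem.List.pyGetD s (i + 1) (0,0,0,0)).2.1 - (PySem.List.pyGetD s i (0,0,0,0)).2.1
                then some (i + 1) else none)
      = (pvGaps s).map (fun i : Nat => (i : Int)) := by
  rw [PySem.List.pyRange_one, List.filterMap_map, pvGaps, List.map_filterMap]
  have hn : ((s.length : Int) - 1 - 0).toNat = s.length - 1 := by omega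
  rw [hn]
  apply List.filterMap_congr
  intro i hi
  simp only [Function.comp, pvGapAt, List.getD_eq_getElem?_getD, decide_eq_true_eq]
  rw [show ((0 : Int) + (i : Nat)) = ((i : Nat) : Int) by ring]
  rw [show ((i : Nat) : Int) + 1 = ((i + 1 : Nat) : Int) by push_cast; ring]
  rw [PySem.List.pyGetD_natCast, PySem.List.pyGetD_natCast]
  simp only [List.getD_eq_getElem?_getD]
  split_ifs with h1
  · norm_cast
  · rfl

lemma zip_tail_map {α β : Type} (f : α → β) (l : List α) :
    ((l.map f).zip (l.map f).tail) = (l.zip l.tail).map (fun ab => (f ab.1, f ab.2)) := by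
  rw [← List.map_tail, List.zip_map]
  rfl

-- bridge: port B equals sorting each group of pvGroups
lemma altB_eq (contours : List (Int × Int × Int × Int)) :
    sort_contours_alt contours
      = (pvGroups (PySem.List.sorted contours (fun x => x.2.1))).map
          (fun g => PySem.List.sorted g pvLexKey) := by
  unfold sort_contours_alt pvGroups
  dsimp only
  set s := PySem.List.sorted contours (fun x => x.2.1) with hs
  have hcuts : ([ (0:Int) ] ++ (PySem.List.pyRange 0 ((s.length : Int) - 1) 1).filterMap
      (fun i => if 50 ≤ (PySem.List.pyGetD s (i + 1) (0,0,0,0)).2.1 - (PySem.List.pyGetD s i (0,0,0,0)).2.1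
                then some (i + 1) else none)
      ++ [(s.length : Int)])
      = (pvCuts s).map (fun i : Nat => (i : Int)) := by
    rw [List.append_assoc, gaps_int_eq, pvCuts]
    simp
  rw [hcuts, zip_tail_map, List.map_map, List.map_map]
  apply List.map_congr_left
  intro ab hab
  simp only [Function.comp]
  congr 1
  exact PySem.List.slice_natCast s ab.1 ab.2

-- ----- pvGaps recursion -----
lemma pvGaps_cons (p c : Int × Int × Int × Int) (t : List (Int × Int × Int × Int)) :
    pvGaps (p :: c :: t)
      = (if 50 ≤ c.2.1 - p.2.1 then [1] else []) ++ (pvGaps (c :: t)).map (· + 1) := by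
  unfold pvGaps
  simp only [List.length_cons]
  rw [show (t.length + 1 + 1 - 1) = t.length + 1 by omega,
      List.range_succ_eq_map, List.filterMap_cons, List.filterMap_map]
  have h0 : pvGapAt (p :: c :: t) 0 = decide (50 ≤ c.2.1 - p.2.1) := by
    simp [pvGapAt]
  have hshift : ∀ i : Nat, pvGapAt (p :: c :: t) (i + 1) = pvGapAt (c :: t) i := by
    intro i; simp [pvGapAt]
  have htail : (List.range t.length).filterMap
        ((fun i => if pvGapAt (p :: c :: t) i then some (i + 1) else none) ∘ Nat.succ)
      = (pvGaps (c :: t)).map (· + 1) := by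
    rw [pvGaps, List.length_cons, List.map_filterMap]
    rw [show (t.length + 1 - 1) = t.length by omega]
    apply List.filterMap_congr
    intro i _
    simp only [Function.comp]
    rw [show i.succ = i + 1 from rfl, hshift]
    split_ifs <;> rfl
  rw [htail, h0]
  split_ifs with h <;> simp_all [pvGaps]

-- ----- B-side: pvGroups computes pvAttach on a y-sorted list -----
lemma groups_eq_attach (rest : List (Int × Int × Int × Int)) :
    ∀ p : Int × Int × Int × Int,
      List.Pairwise (fun a b : Int × Int × Int × Int => a.2.1 ≤ b.2.1) (p :: rest) →
      pvGroups (p :: rest) = pvAttach [p] p rest := by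
  induction rest with
  | nil =>
    intro p _
    simp [pvGroups, pvCuts, pvGaps, pvAttach]
  | cons c t ih =>
    intro p hpw
    have hpc : p.2.1 ≤ c.2.1 := (List.pairwise_cons.mp hpw).1 c (by simp)
    have hpw' : List.Pairwise (fun a b : Int × Int × Int × Int => a.2.1 ≤ b.2.1) (c :: t) :=
      (List.pairwise_cons.mp hpw).2
    have hIH := ih c hpw'
    unfold pvGroups pvCuts
    rw [pvGaps_cons]
    split_ifs with hgap
    · -- gap: new group [p], then groups of (c :: t) shifted by one
      have hcond : ¬ (p.2.1 - 50 < c.2.1 ∧ c.2.1 < p.2.1 + 50) := by omega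
      rw [pvAttach, if_neg hcond]
      rw [show (0 :: (([1] ++ (pvGaps (c :: t)).map (· + 1)) ++ [(p :: c :: t).length]))
            = 0 :: 1 :: ((pvGaps (c :: t) ++ [(c :: t).length]).map (· + 1)) by
          simp [List.length_cons]]
      simp only [List.zip_cons_cons, List.tail_cons, List.map_cons]
      rw [show ((1 : Nat) :: (pvGaps (c :: t) ++ [(c :: t).length]).map (· + 1))
            = (0 :: (pvGaps (c :: t) ++ [(c :: t).length])).map (· + 1) by simp]
      rw [List.zip_map, List.map_map]
      congr 1
      rw [← hIH]
      unfold pvGroups pvCuts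
      simp only [List.tail_cons]
      apply List.map_congr_left
      intro ab _
      simp [Function.comp, Prod.map, Nat.add_sub_add_right]
    · -- no gap: p joins the first group of (c :: t)
      have hcond : (p.2.1 - 50 < c.2.1 ∧ c.2.1 < p.2.1 + 50) := by omega
      rw [pvAttach, if_pos hcond]
      rw [show pvAttach ([p] ++ [c]) c t
            = (([p] ++ (pvAttach [c] c t).headI) :: (pvAttach [c] c t).tail) from
          pvAttach_il [p] [c] c t]
      rw [show (0 :: (([] ++ (pvGaps (c :: t)).map (· + 1)) ++ [(p :: c :: t).length]))
            = 0 :: ((pvGaps (c :: t) ++ [(c :: t).length]).map (· + 1)) by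
          simp [List.length_cons]]
      obtain ⟨x, l', hx⟩ : ∃ x l', pvGaps (c :: t) ++ [(c :: t).length] = x :: l' := by
        cases h : pvGaps (c :: t) ++ [(c :: t).length] with
        | nil => exact absurd h (by simp)
        | cons x l' => exact ⟨x, l', rfl⟩
      rw [hx]
      simp only [List.map_cons, List.zip_cons_cons, List.tail_cons]
      have hinner : pvAttach [c] c t = ((c :: t).take x) :: (((x :: l').zip l').map
          (fun ab => (((c :: t).drop ab.1).take (ab.2 - ab.1)))) := by
        rw [← hIH]
        unfold pvGroups pvCuts
        rw [hx]
        simp only [List.zip_cons_cons, List.tail_cons, List.map_cons]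
        simp
      rw [show (pvAttach [c] c t).headI = (c :: t).take x by rw [hinner]; rfl]
      rw [show (pvAttach [c] c t).tail = ((x :: l').zip l').map
          (fun ab => (((c :: t).drop ab.1).take (ab.2 - ab.1))) by rw [hinner]; rfl]
      rw [show (((x + 1) :: l'.map (· + 1)) = (x :: l').map (· + 1)) by simp]
      rw [List.zip_map, List.map_map]
      congr 1
      simp

-- ===== VERDICT (by name: the statement is the Claim_ definition above) =====
theorem sort_contours_spec : Claim_equal_sort_contours := by
  intro contours _ hpre
  unfold Spec_sort_contours
  rw [altB_eq]
  unfold sort_contours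
  dsimp only
  cases hs : PySem.List.sorted contours (fun x => x.2.1) with
  | nil =>
    rw [PySem.List.sorted_eq_nil_iff] at hs
    exact absurd hs hpre
  | cons p rest =>
    dsimp only
    have hpw : List.Pairwise (fun a b : Int × Int × Int × Int => a.2.1 ≤ b.2.1) (p :: rest) := by
      have h := PySem.List.sorted_pairwise contours (fun x => x.2.1)
      rw [hs] at h
      exact h
    rw [groups_eq_attach rest p hpw]
    congr 1
    have hc : p.2.1 - 50 < p.2.1 ∧ p.2.1 < p.2.1 + 50 := by omega
    have hstep : sortContoursStep ([], [], p) p = ([], [p], p) := by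
      simp [sortContoursStep, hc]
    have h1 : List.foldl sortContoursStep ([], [], p) (p :: rest)
        = List.foldl sortContoursStep ([], [p], p) rest := by
      rw [List.foldl_cons, hstep]
    rw [h1]
    have h2 := foldA_eq rest [] [p] p
    rw [List.nil_append] at h2
    exact h2
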